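-- pv_equiv track=rewrite | github.com/ardzz/SheerIDVerifier | sheerid_verifier/data/transcript.py | _generate_semester_labels
-- ===== SOURCE A (Python) =====
-- def _generate_semester_labels(num_semesters: int, start_year: int) -> list[str]:
--     """
--     Generate semester labels like 'Fall 2023', 'Spring 2024'.
--
--     Academic year pattern: Fall YYYY -> Spring YYYY+1 -> Fall YYYY+1 -> Spring YYYY+2
--     (Spring semester is in the calendar year following the Fall semester)
--
--     Args:
--         num_semesters: Number of semesters to generate
--         start_year: Starting academic year (year of first Fall semester)
--
--     Returns:
--         List of semester label strings
--     """
--     labels = []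
--     year = start_year
--     is_fall = True  # Start with Fall semester
--
--     for _ in range(num_semesters):
--         if is_fall:
--             labels.append(f"Fall {year}")
--         else:
--             # Spring is in the calendar year after Fall
--             labels.append(f"Spring {year + 1}")
--             year += 1  # Move to next academic year after Spring
--
--         is_fall = not is_fall
--
--     return labels
-- ===== SOURCE B (Python) =====
-- def _generate_semester_labels(num_semesters: int, start_year: int) -> list[str]:
--     # Stage 1: build whole academic-year pairs (Fall y, Spring y+1); Stage 2: trim.
--     labels = []
--     num_years = (num_semesters + 1) // 2
--     for k in range(num_years):
--         labels.extend([f"Fall {start_year + k}", f"Spring {start_year + k + 1}"])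
--     return labels[:num_semesters]
-- ===== Notes on version B (the rewrite author's own statement) =====
-- stated objective: alternative
-- what changed: Instead of A's per-semester loop with mutable year/is_fall state, B generates complete academic-year pairs ['Fall y','Spring y+1'] for (n+1)//2 years (possibly one label too many) and then truncates the flattened list to n labels.
import Mathlib
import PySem

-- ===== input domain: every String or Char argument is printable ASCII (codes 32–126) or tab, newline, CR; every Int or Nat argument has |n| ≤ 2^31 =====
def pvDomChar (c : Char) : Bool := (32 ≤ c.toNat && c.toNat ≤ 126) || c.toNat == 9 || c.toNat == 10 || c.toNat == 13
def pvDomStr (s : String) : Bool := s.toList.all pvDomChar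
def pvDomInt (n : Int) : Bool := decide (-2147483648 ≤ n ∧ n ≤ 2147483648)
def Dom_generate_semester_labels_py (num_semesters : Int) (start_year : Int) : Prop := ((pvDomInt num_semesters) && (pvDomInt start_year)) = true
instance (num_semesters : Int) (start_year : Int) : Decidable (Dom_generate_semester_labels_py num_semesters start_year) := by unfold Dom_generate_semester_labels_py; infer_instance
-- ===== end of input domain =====

-- B builds whole academic-year pairs and truncates, instead of A's per-semester mutable-state loop (alternative decomposition; same cost).

-- ===== PORT A =====
-- A's loop: state (labels, year, is_fall), one step per range element.
def generate_semester_labels_py (num_semesters : Int) (start_year : Int) : List String :=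
  ((PySem.List.pyRange 0 num_semesters 1).foldl
    (fun (st : List String × Int × Bool) _ =>
      if st.2.2 then (st.1 ++ ["Fall " ++ PySem.Int.toStr st.2.1], st.2.1, false)
      else (st.1 ++ ["Spring " ++ PySem.Int.toStr (st.2.1 + 1)], st.2.1 + 1, true))
    ([], start_year, true)).1

-- ===== PORT B =====
-- B's code: num_years = (n+1)//2; extend labels by a two-element pair per year; labels[:n].
def generate_semester_labels_py_alt (num_semesters : Int) (start_year : Int) : List String :=
  PySem.List.slice
    ((PySem.List.pyRange 0 (PySem.Int.floordiv (num_semesters + 1) 2) 1).foldl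
      (fun acc k => acc ++ ["Fall " ++ PySem.Int.toStr (start_year + k),
                            "Spring " ++ PySem.Int.toStr (start_year + k + 1)]) [])
    none (some num_semesters)

-- ===== PRECONDITION & SPEC =====
def Spec_generate_semester_labels_py (num_semesters : Int) (start_year : Int) (out : List String) : Prop := out = generate_semester_labels_py_alt num_semesters start_year
instance (num_semesters : Int) (start_year : Int) (out : List String) : Decidable (Spec_generate_semester_labels_py num_semesters start_year out) := by unfold Spec_generate_semester_labels_py; infer_instance

-- ===== CLAIM =====
def Claim_equal_generate_semester_labels_py : Prop := ∀ (num_semesters : Int) (start_year : Int), Dom_generate_semester_labels_py num_semesters start_year → Spec_generate_semester_labels_py num_semesters start_year (generate_semester_labels_py num_semesters start_year)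

-- ===== LEMMAS AND PROOFS =====

-- the per-index label formula, over a Nat index
def pvLabel (s : Int) (k : Nat) : String :=
  if k % 2 = 0 then "Fall " ++ PySem.Int.toStr (s + (k / 2 : Nat))
  else "Spring " ++ PySem.Int.toStr (s + (k / 2 : Nat) + 1)

-- invariant of A's loop after m iterations
theorem pvLoop_inv (s : Int) (m : Nat) :
    (List.range m).foldl
      (fun (st : List String × Int × Bool) _ =>
        if st.2.2 then (st.1 ++ ["Fall " ++ PySem.Int.toStr st.2.1], st.2.1, false)
        else (st.1 ++ ["Spring " ++ PySem.Int.toStr (st.2.1 + 1)], st.2.1 + 1, true))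
      ([], s, true)
    = ((List.range m).map (pvLabel s), s + (m / 2 : Nat), decide (m % 2 = 0)) := by
  induction m with
  | zero => simp
  | succ m ih =>
    rw [List.range_succ, List.foldl_append, ih]
    simp only [List.foldl, List.map_append, List.map]
    by_cases h : m % 2 = 0
    · rw [if_pos (by simp [h])]
      refine Prod.ext ?_ (Prod.ext ?_ ?_)
      · show _ ++ _ = _ ++ [pvLabel s m]
        rw [pvLabel, if_pos h]
      · show s + ((m / 2 : Nat) : Int) = s + (((m + 1) / 2 : Nat) : Int)
        have : (m + 1) / 2 = m / 2 := by omega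
        rw [this]
      · show false = decide ((m + 1) % 2 = 0)
        rw [decide_eq_false (by omega)]
    · rw [if_neg (by simp [h])]
      refine Prod.ext ?_ (Prod.ext ?_ ?_)
      · show _ ++ _ = _ ++ [pvLabel s m]
        rw [pvLabel, if_neg h]
      · show s + ((m / 2 : Nat) : Int) + 1 = s + (((m + 1) / 2 : Nat) : Int)
        omega
      · show true = decide ((m + 1) % 2 = 0)
        symm; rw [decide_eq_true_eq]; omega

-- B's year pairs, flattened, are the per-index labels for 2*y semesters
theorem pvPairs_eq (s : Int) (y : Nat) :
    (List.range y).flatMap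
      (fun (k : Nat) => ["Fall " ++ PySem.Int.toStr (s + (k : Int)),
                 "Spring " ++ PySem.Int.toStr (s + (k : Int) + 1)])
    = (List.range (2 * y)).map (pvLabel s) := by
  induction y with
  | zero => simp
  | succ y ih =>
    rw [List.range_succ, List.flatMap_append, ih]
    have h2 : 2 * (y + 1) = (2 * y + 1) + 1 := by ring
    rw [h2, List.range_succ, List.range_succ, List.map_append, List.map_append]
    simp only [List.flatMap_cons, List.flatMap_nil, List.append_nil, List.map]
    rw [List.append_assoc]
    congr 1
    have hf : pvLabel s (2 * y) = "Fall " ++ PySem.Int.toStr (s + (y : Int)) := by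
      rw [pvLabel, if_pos (by omega)]
      congr 2
      have : 2 * y / 2 = y := by omega
      rw [this]
    have hs : pvLabel s (2 * y + 1) = "Spring " ++ PySem.Int.toStr (s + (y : Int) + 1) := by
      rw [pvLabel, if_neg (by omega)]
      congr 3
      have : (2 * y + 1) / 2 = y := by omega
      rw [this]
    rw [hf, hs]
    rfl

theorem generate_semester_labels_py_eq_alt (n s : Int) :
    generate_semester_labels_py n s = generate_semester_labels_py_alt n s := by
  unfold generate_semester_labels_py generate_semester_labels_py_alt
  rw [PySem.List.pyRange_one, PySem.List.pyRange_one]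
  simp only [zero_add, Int.sub_zero]
  rw [List.foldl_map, pvLoop_inv s (n.toNat)]
  rw [List.foldl_map, PySem.List.foldl_append_eq_flatMap]
  rw [List.nil_append, pvPairs_eq s]
  have hfd : PySem.Int.floordiv (n + 1) 2 = (n + 1) / 2 :=
    PySem.Int.floordiv_eq_ediv_of_pos (by omega)
  by_cases hn : 0 ≤ n
  · have hy : (PySem.Int.floordiv (n + 1) 2).toNat = (n.toNat + 1) / 2 := by
      rw [hfd]; omega
    rw [hy, PySem.List.slice_to _ hn, ← List.map_take, List.take_range,
      show min n.toNat (2 * ((n.toNat + 1) / 2)) = n.toNat by omega]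
  · have hy : (PySem.Int.floordiv (n + 1) 2).toNat = 0 := by
      rw [hfd]; omega
    have hm : n.toNat = 0 := by omega
    rw [hy, hm]
    simp [PySem.List.slice]

-- ===== VERDICT =====
theorem generate_semester_labels_py_spec : Claim_equal_generate_semester_labels_py := by
  intro n s _
  exact generate_semester_labels_py_eq_alt n s
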